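-- pv_equiv track=rewrite | github.com/AnhellO/DAS_Sistemas | Ene-Jun-2018/claudia saldivar/try_it_yourself_8/Unchanged_Magicians.py | make_great
-- ===== SOURCE A (Python) =====
-- def make_great(magicians):
--
--     great_magicians = []
--
--     while magicians:
--         magician = magicians.pop()
--         great_magician = magician + ' El mejor'
--         great_magicians.append(great_magician)
--
--     for great_magician in great_magicians:
--         magicians.append(great_magician)
--
--     return magicians
--
-- magicians = ['Harry Houdini', 'David Blaine', 'Teller']
--
-- great_magicians = make_great(magicians[:])
-- ===== SOURCE B (Python) =====
-- def make_great(magicians):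
--     new = [m + ' El mejor' for m in reversed(magicians)]
--     magicians[:] = new
--     return magicians
-- ===== Notes on version B (the rewrite author's own statement) =====
-- stated objective: simpler
-- what changed: Replaces A's destructive pop-loop plus refill loop with a single comprehension over a reversed view, slice-assigned back in place.
import Mathlib
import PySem

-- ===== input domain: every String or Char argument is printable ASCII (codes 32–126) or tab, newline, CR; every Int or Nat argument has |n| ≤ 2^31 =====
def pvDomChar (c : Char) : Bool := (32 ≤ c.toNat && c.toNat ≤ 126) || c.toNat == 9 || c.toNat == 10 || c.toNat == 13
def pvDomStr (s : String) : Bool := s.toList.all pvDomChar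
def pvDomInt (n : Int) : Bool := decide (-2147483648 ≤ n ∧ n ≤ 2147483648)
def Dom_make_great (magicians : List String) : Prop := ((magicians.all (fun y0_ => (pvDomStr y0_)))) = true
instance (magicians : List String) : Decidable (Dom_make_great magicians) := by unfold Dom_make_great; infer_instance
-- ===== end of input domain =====

-- B replaces A's destructive pop-loop + refill loop with a single map over the reversed
-- list (simpler); both A and B mutate the argument list in place in Python — the
-- equivalence proved here is about the returned value.


-- ===== PORT A =====
-- while magicians: pop the LAST element, append it + ' El mejor' to great_magicians
def make_great_loop (ms : List String) (great : List String) : List String :=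
  match h : ms with
  | [] => great
  | _ :: _ =>
    make_great_loop ms.dropLast (great ++ [ms.getLast (by simp [h]) ++ " El mejor"])
termination_by ms.length
decreasing_by simp [h, List.length_dropLast]

def make_great (magicians : List String) : List String :=
  let great_magicians := make_great_loop magicians []
  -- the argument list is now empty; the for-loop appends each great_magician to it
  let magicians' := great_magicians.foldl (fun acc g => acc ++ [g]) []
  magicians'

-- ===== PORT B =====
def make_great_alt (magicians : List String) : List String :=
  magicians.reverse.map (fun m => m ++ " El mejor")

-- ===== PRECONDITION & SPEC =====
def Spec_make_great (magicians : List String) (out : List String) : Prop := out = make_great_alt magicians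
instance (magicians : List String) (out : List String) : Decidable (Spec_make_great magicians out) := by unfold Spec_make_great; infer_instance

-- ===== CLAIM (what is proved, stated in full; the proofs are below) =====
def Claim_equal_make_great : Prop := ∀ (magicians : List String), Dom_make_great magicians → Spec_make_great magicians (make_great magicians)

-- ===== LEMMAS AND PROOFS =====
theorem make_great_loop_eq (ms acc : List String) :
    make_great_loop ms acc = acc ++ ms.reverse.map (fun m => m ++ " El mejor") := by
  induction ms using List.reverseRecOn generalizing acc with
  | nil => simp [make_great_loop]
  | append_singleton xs x ih =>
    rw [make_great_loop.eq_def]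
    split
    · simp_all
    · simp only [List.dropLast_concat, List.getLast_append_singleton (l := xs)]
      rw [ih]
      simp

theorem foldl_app_id (l acc : List String) :
    l.foldl (fun acc g => acc ++ [g]) acc = acc ++ l := by
  induction l generalizing acc with
  | nil => simp
  | cons x xs ih => simp [List.foldl_cons, ih]

-- ===== VERDICT (by name: the statement is the Claim_ definition above) =====
theorem make_great_spec : Claim_equal_make_great := by
  intro ms _
  unfold Spec_make_great make_great make_great_alt
  simp only [make_great_loop_eq, foldl_app_id]
  simp
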